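-- pv_equiv track=rewrite | github.com/ulelab/LIN28A_RNPreassembly_bioinformatics | src/KmerGroups.py | get_unique_string_tokens
-- ===== SOURCE A (Python) =====
-- def get_unique_string_tokens(test_str):
--     tokens = [test_str[i: j] for i in range(len(test_str)) for j in range(i + 1, len(test_str) + 1)]
--     # Filter tokens that correspond to test_str
--     tokens = [t for t in tokens if t != test_str]
--     ugca_tokens = []
--     unique_tokens = sorted(list(set(tokens)))
--     token_counts = [tokens.count(i) for i in unique_tokens]
--     for tup in list(zip(unique_tokens, token_counts)):
--         for i in range(tup[1]):
--             ugca_tokens.append(f'{tup[0]}{i+1}')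
--     return ugca_tokens
-- ===== SOURCE B (Python) =====
-- def get_unique_string_tokens(test_str):
--     tokens = [test_str[i:j] for i in range(len(test_str)) for j in range(i + 1, len(test_str) + 1)]
--     tokens = [t for t in tokens if t != test_str]
--     out = []
--     prev = None
--     cnt = 0
--     for tok in sorted(tokens):
--         cnt = cnt + 1 if tok == prev else 1
--         prev = tok
--         out.append(f'{tok}{cnt}')
--     return out
-- ===== Notes on version B (the rewrite author's own statement) =====
-- stated objective: faster
-- what changed: Replaces the set + per-unique-token tokens.count + zip regeneration with a single run-length pass over the duplicate-keeping sorted token list, maintaining a previous-token/counter pair.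
import Mathlib
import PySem

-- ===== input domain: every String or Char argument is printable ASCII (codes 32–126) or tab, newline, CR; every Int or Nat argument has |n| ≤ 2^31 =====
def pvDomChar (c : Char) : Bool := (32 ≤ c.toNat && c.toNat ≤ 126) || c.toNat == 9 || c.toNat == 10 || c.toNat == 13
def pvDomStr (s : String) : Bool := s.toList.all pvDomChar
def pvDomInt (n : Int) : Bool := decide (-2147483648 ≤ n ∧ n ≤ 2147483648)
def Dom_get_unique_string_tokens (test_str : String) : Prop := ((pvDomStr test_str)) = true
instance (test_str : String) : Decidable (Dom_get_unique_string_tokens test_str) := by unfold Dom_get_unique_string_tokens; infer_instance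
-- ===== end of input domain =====

-- B replaces A's set + per-unique-token .count + zip regeneration by one run-length pass over
-- the sorted duplicate-keeping token list (measured faster).

-- ===== PORT A =====
def get_unique_string_tokens (test_str : String) : List String :=
  let n : Int := PySem.Str.len test_str
  let tokens : List String :=
    (PySem.List.pyRange 0 n 1).flatMap (fun i =>
      (PySem.List.pyRange (i + 1) (n + 1) 1).map (fun j =>
        PySem.Str.slice test_str (some i) (some j)))
  let tokens := tokens.filter (fun t => t != test_str)
  let unique_tokens := PySem.List.sorted (PySem.Set.ofList tokens) (fun x => x) false
  let token_counts := unique_tokens.map (fun i => (PySem.List.count tokens i : Int))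
  (unique_tokens.zip token_counts).foldl (fun acc tup =>
    (PySem.List.pyRange 0 tup.2 1).foldl (fun acc2 i =>
      acc2 ++ [tup.1 ++ PySem.Int.toStr (i + 1)]) acc) []

-- ===== PORT B =====
-- run-length step: state = (out, prev, cnt)
def pvRLStep (st : List String × Option String × Int) (tok : String) :
    List String × Option String × Int :=
  let cnt : Int := if st.2.1 = some tok then st.2.2 + 1 else 1
  (st.1 ++ [tok ++ PySem.Int.toStr cnt], some tok, cnt)

def get_unique_string_tokens_alt (test_str : String) : List String :=
  let n : Int := PySem.Str.len test_str
  let tokens : List String :=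
    (PySem.List.pyRange 0 n 1).flatMap (fun i =>
      (PySem.List.pyRange (i + 1) (n + 1) 1).map (fun j =>
        PySem.Str.slice test_str (some i) (some j)))
  let tokens := tokens.filter (fun t => t != test_str)
  ((PySem.List.sorted tokens (fun x => x) false).foldl pvRLStep ([], none, 0)).1

-- ===== PRECONDITION & SPEC =====
def Spec_get_unique_string_tokens (test_str : String) (out : List String) : Prop := out = get_unique_string_tokens_alt test_str
instance (test_str : String) (out : List String) : Decidable (Spec_get_unique_string_tokens test_str out) := by unfold Spec_get_unique_string_tokens; infer_instance

-- ===== CLAIM (what is proved, stated in full; the proofs are below) =====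
def Claim_equal_get_unique_string_tokens : Prop := ∀ (test_str : String), Dom_get_unique_string_tokens test_str → Spec_get_unique_string_tokens test_str (get_unique_string_tokens test_str)

-- ===== LEMMAS AND PROOFS =====

-- labels for one token value: u1, u2, ..., uc
def pvLabels (u : String) (c : Nat) : List String :=
  (List.range c).map (fun (k : Nat) => u ++ PySem.Int.toStr ((k : Int) + 1))

-- running the step over a block of c copies of u, starting at counter m with prev = u
lemma pvRL_run_from (u : String) (c : Nat) :
    ∀ (out : List String) (m : Int),
      (List.replicate c u).foldl pvRLStep (out, some u, m) =
        (out ++ (List.range c).map (fun (k : Nat) => u ++ PySem.Int.toStr (m + (k : Int) + 1)),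
          some u, m + (c : Int)) := by
  induction c with
  | zero => intro out m; simp
  | succ c ih =>
    intro out m
    rw [List.replicate_succ, List.foldl_cons]
    simp only [pvRLStep]
    rw [ih]
    refine Prod.ext ?_ (Prod.ext rfl (by push_cast; ring))
    show out ++ [u ++ PySem.Int.toStr (m + 1)] ++
        (List.range c).map (fun (k : Nat) => u ++ PySem.Int.toStr (m + 1 + (k : Int) + 1)) =
        out ++ (List.range (c + 1)).map (fun (k : Nat) => u ++ PySem.Int.toStr (m + (k : Int) + 1))
    rw [List.range_succ_eq_map, List.map_cons, List.map_map, List.append_assoc]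
    congr 1
    rw [List.singleton_append]
    congr 1
    · norm_num
    · apply List.map_congr_left
      intro k _
      simp only [Function.comp_apply]
      congr 2
      push_cast
      ring

-- running the step over a nonempty block entered with prev ≠ u
lemma pvRL_run_block (u : String) (c : Nat) (hc : 0 < c) (out : List String)
    (prev : Option String) (cnt : Int) (hprev : prev ≠ some u) :
    (List.replicate c u).foldl pvRLStep (out, prev, cnt) =
      (out ++ pvLabels u c, some u, (c : Int)) := by
  obtain ⟨c', rfl⟩ : ∃ c', c = c' + 1 := ⟨c - 1, by omega⟩
  rw [List.replicate_succ, List.foldl_cons]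
  simp only [pvRLStep, if_neg hprev]
  rw [pvRL_run_from]
  refine Prod.ext ?_ (Prod.ext rfl (by push_cast; ring))
  show out ++ [u ++ PySem.Int.toStr 1] ++
      (List.range c').map (fun (k : Nat) => u ++ PySem.Int.toStr (1 + (k : Int) + 1)) =
      out ++ pvLabels u (c' + 1)
  unfold pvLabels
  rw [List.range_succ_eq_map, List.map_cons, List.map_map, List.append_assoc]
  congr 1
  rw [List.singleton_append]
  congr 1
  apply List.map_congr_left
  intro k _
  simp only [Function.comp_apply]
  congr 1
  push_cast
  ring_nf

-- running over a concatenation of blocks for pairwise-distinct values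
lemma pvRL_run_blocks (f : String → Nat) :
    ∀ (us : List String), us.Nodup → (∀ u ∈ us, 0 < f u) →
      ∀ (out : List String) (prev : Option String) (cnt : Int),
        (∀ u ∈ us, prev ≠ some u) →
        ((us.flatMap (fun u => List.replicate (f u) u)).foldl pvRLStep (out, prev, cnt)).1 =
          out ++ us.flatMap (fun u => pvLabels u (f u)) := by
  intro us
  induction us with
  | nil => intro _ _ out prev cnt _; simp
  | cons u us ih =>
    intro hnd hpos out prev cnt hprev
    rw [List.flatMap_cons, List.foldl_append,
      pvRL_run_block u (f u) (hpos u (by simp)) out prev cnt (hprev u (by simp))]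
    rw [ih (List.nodup_cons.mp hnd).2 (fun v hv => hpos v (by simp [hv]))
      (out ++ pvLabels u (f u)) (some u) (f u)
      (fun v hv h => (List.nodup_cons.mp hnd).1 (by rw [Option.some.inj h]; exact hv))]
    simp [List.flatMap_cons]

-- counts inside a flatMap of replicate blocks over a Nodup list
lemma pvCount_flatMap_replicate (f : String → Nat) (a : String) :
    ∀ (us : List String), us.Nodup →
      (us.flatMap (fun u => List.replicate (f u) u)).count a =
        if a ∈ us then f a else 0 := by
  intro us
  induction us with
  | nil => simp
  | cons u us ih =>
    intro hnd
    rw [List.flatMap_cons, List.count_append, ih (List.nodup_cons.mp hnd).2,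
      List.count_replicate]
    by_cases hau : a = u
    · subst hau
      simp [if_neg ((List.nodup_cons.mp hnd).1)]
    · simp [hau, Ne.symm hau]

-- the flatMap of replicate blocks is sorted when the values are strictly increasing
lemma pvPairwise_flatMap_replicate (f : String → Nat) :
    ∀ (us : List String), us.Pairwise (· < ·) →
      (us.flatMap (fun u => List.replicate (f u) u)).Pairwise (· ≤ ·) := by
  intro us
  induction us with
  | nil => simp
  | cons u us ih =>
    intro hpw
    rw [List.flatMap_cons, List.pairwise_append]
    refine ⟨List.pairwise_replicate.mpr (Or.inr le_rfl), ih (List.pairwise_cons.mp hpw).2, ?_⟩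
    intro x hx y hy
    obtain ⟨v, hv, hyv⟩ := List.mem_flatMap.mp hy
    rw [List.eq_of_mem_replicate hx, List.eq_of_mem_replicate hyv]
    exact le_of_lt ((List.pairwise_cons.mp hpw).1 v hv)

-- sorted l = concatenation of replicate blocks over sorted(set(l))
lemma pvSorted_eq_blocks (l : List String) :
    PySem.List.sorted l (fun x => x) false =
      (PySem.List.sorted (PySem.Set.ofList l) (fun x => x) false).flatMap
        (fun u => List.replicate (l.count u) u) := by
  have hpw : (PySem.List.sorted (PySem.Set.ofList l) (fun x => x) false).Pairwise (· < ·) :=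
    PySem.List.sorted_ofList_pairwise_lt l
  have hnd : (PySem.List.sorted (PySem.Set.ofList l) (fun x => x) false).Nodup :=
    hpw.imp (fun h => ne_of_lt h)
  apply PySem.List.sorted_id_eq_of_perm_of_pairwise
  · rw [List.perm_iff_count]
    intro a
    rw [pvCount_flatMap_replicate _ a _ hnd]
    by_cases ha : a ∈ l
    · rw [if_pos (by rw [PySem.List.mem_sorted]; exact (PySem.Set.mem_ofList _ _).mpr ha)]
    · rw [if_neg (by rw [PySem.List.mem_sorted, PySem.Set.mem_ofList _ _]; exact ha),
        List.count_eq_zero_of_not_mem ha]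
  · exact pvPairwise_flatMap_replicate _ _ hpw

-- A's outer loop over zip(unique, counts) is a flatMap of its inner loop's output
lemma pvA_fold (g : String → Int) :
    ∀ (us : List String) (acc : List String),
      (us.zip (us.map g)).foldl (fun acc tup =>
          (PySem.List.pyRange 0 tup.2 1).foldl (fun acc2 i =>
            acc2 ++ [tup.1 ++ PySem.Int.toStr (i + 1)]) acc) acc =
        acc ++ us.flatMap (fun u =>
          (PySem.List.pyRange 0 (g u) 1).map (fun i => u ++ PySem.Int.toStr (i + 1))) := by
  intro us
  induction us with
  | nil => intro acc; simp
  | cons u us ih =>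
    intro acc
    rw [List.map_cons, List.zip_cons_cons, List.foldl_cons,
      PySem.List.foldl_append_singleton_eq_map, ih, List.flatMap_cons, List.append_assoc]

-- the inner labels of A coincide with pvLabels
lemma pvInner_labels (u : String) (c : Nat) :
    (PySem.List.pyRange 0 (c : Int) 1).map (fun i => u ++ PySem.Int.toStr (i + 1)) =
      pvLabels u c := by
  rw [PySem.List.pyRange_one, List.map_map]
  unfold pvLabels
  simp only [Int.sub_zero, Int.toNat_natCast]
  apply List.map_congr_left
  intro k _
  simp [Function.comp_apply]

-- core equality on an arbitrary token list
lemma pvCore (l : List String) :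
    ((PySem.List.sorted l (fun x => x) false).foldl pvRLStep ([], none, 0)).1 =
    (let unique := PySem.List.sorted (PySem.Set.ofList l) (fun x => x) false
     (unique.zip (unique.map (fun i => (PySem.List.count l i : Int)))).foldl
       (fun acc tup => (PySem.List.pyRange 0 tup.2 1).foldl (fun acc2 i =>
         acc2 ++ [tup.1 ++ PySem.Int.toStr (i + 1)]) acc) []) := by
  have hpw : (PySem.List.sorted (PySem.Set.ofList l) (fun x => x) false).Pairwise (· < ·) :=
    PySem.List.sorted_ofList_pairwise_lt l
  have hnd : (PySem.List.sorted (PySem.Set.ofList l) (fun x => x) false).Nodup :=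
    hpw.imp (fun h => ne_of_lt h)
  simp only []
  rw [pvA_fold, List.nil_append, pvSorted_eq_blocks]
  rw [pvRL_run_blocks (fun u => l.count u) _ hnd
    (fun u hu => List.count_pos_iff.mpr
      ((PySem.Set.mem_ofList _ _).mp ((PySem.List.mem_sorted _ _ _ _).mp hu)))
    [] none 0 (fun u _ h => by simp at h), List.nil_append]
  congr 1
  funext u
  rw [PySem.List.count_eq, pvInner_labels]

-- ===== VERDICT (by name: the statement is the Claim_ definition above) =====
theorem get_unique_string_tokens_spec : Claim_equal_get_unique_string_tokens := by
  intro test_str _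
  unfold Spec_get_unique_string_tokens get_unique_string_tokens get_unique_string_tokens_alt
  exact (pvCore _).symm
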